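-- pv_equiv track=rewrite | github.com/DysonLewis/TI-Nspire-python-stuff | Python/FeedFoward.py | generate_weight_combinations
-- ===== SOURCE A (Python) =====
-- def generate_weight_combinations(n, max_val):
--     # Generate all combinations of n weights in range [-max_val, max_val]
--     # Replaces itertools.product(range(-max_val, max_val + 1), repeat=n)
--     if n == 0:
--         return [[]]
--
--     result = []
--     total_values = 2 * max_val + 1
--     total_combos = total_values ** n
--
--     for i in range(total_combos):
--         combo = []
--         num = i
--         for j in range(n):
--             val = (num % total_values) - max_val
--             combo.append(val)
--             num //= total_values
--         result.append(combo)
--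
--     return result
-- ===== SOURCE B (Python) =====
-- def generate_weight_combinations(n, max_val):
--     # Odometer (itertools.product-style): keep one index vector, emit the
--     # current combination, then increment position 0 with carry; position 0
--     # varies fastest, matching the required ordering.
--     values = range(-max_val, max_val + 1)  # lazy: indexed, never materialized
--     if not values:
--         return [[]] if n == 0 else []
--     result = []
--     idx = [0] * n
--     while True:
--         result.append([values[i] for i in idx])
--         j = 0
--         while j < n and idx[j] == len(values) - 1:
--             idx[j] = 0
--             j += 1
--         if j == n:
--             return result
--         idx[j] += 1
-- ===== Notes on version B (the rewrite author's own statement) =====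
-- stated objective: alternative
-- what changed: Replaces the flat base-(2*max_val+1) integer counter decoded with % and // per row by an itertools.product-style odometer: one index vector that is emitted and incremented with carry, so each row is derived from the previous one.
-- intended difference: For even n > 0 with max_val < 0 A's negative-divisor modulo arithmetic fabricates a non-empty list of out-of-range combinations (e.g. A(2,-1) = [[1, 1]]), while B returns [], the intended value since the value range [-max_val, max_val] is empty. — e.g. on generate_weight_combinations(2, -1): A returns [[1, 1]], B returns []
import Mathlib
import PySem

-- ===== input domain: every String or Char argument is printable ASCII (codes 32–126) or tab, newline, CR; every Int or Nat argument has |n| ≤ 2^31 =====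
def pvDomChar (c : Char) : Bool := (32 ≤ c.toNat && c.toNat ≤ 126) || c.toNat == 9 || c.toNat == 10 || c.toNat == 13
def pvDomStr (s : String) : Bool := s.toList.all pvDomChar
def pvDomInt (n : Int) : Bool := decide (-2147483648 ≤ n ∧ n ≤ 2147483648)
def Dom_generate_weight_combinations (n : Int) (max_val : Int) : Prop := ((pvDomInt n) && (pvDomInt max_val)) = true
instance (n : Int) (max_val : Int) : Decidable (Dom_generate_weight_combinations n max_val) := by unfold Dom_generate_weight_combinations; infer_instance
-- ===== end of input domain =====

-- B replaces A's row-by-row base-(2*max_val+1) counter/digit-extraction loop by an odometer that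
-- increments an index vector with carry (itertools.product-style; objective: alternative); on even n > 0 with max_val < 0,
-- B returns the intended [] where A does not (D_).

-- ===== PORT A =====
-- 'total_values ** n' is ported with the exponent n.toNat: faithful for n ≥ 0 (Pre_); for n < 0
-- Python raises TypeError (range of a float), excluded by Pre_. The locals total_values /
-- total_combos are inlined; the two 'append' accumulations are written as cons + a final
-- reverse (the same lists, evaluable in linear time).
def generate_weight_combinations (n : Int) (max_val : Int) : List (List Int) :=
  if n = 0 then [[]]
  else
    (((PySem.List.pyRange 0 ((2 * max_val + 1) ^ n.toNat) 1).foldl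
        (fun (result : List (List Int)) i =>
          ((List.range n.toNat).foldl
              (fun (p : List Int × Int) _ =>
                ((PySem.Int.mod p.2 (2 * max_val + 1) - max_val) :: p.1,
                 PySem.Int.floordiv p.2 (2 * max_val + 1)))
              ([], i)).1.reverse :: result)
        []).reverse)

-- ===== PORT B =====
-- Odometer port. B's 'values' is a lazy range object, so 'len(values)' is Python's O(1)
-- range length max(0, stop-start) — ported as ((max_val+1) - -max_val).toNat — and
-- 'values[i]' is the range's O(1) indexing start + i — ported as -max_val + i (every
-- index the loop uses is in range). The inner carry scan 'while j < n and
-- idx[j] == len(values)-1: idx[j] = 0; j += 1' plus 'idx[j] += 1' is odoInc (the zeroed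
-- prefix is the accumulator; none = the scan reached j == n, i.e. the outer loop
-- returns). The 'while True' loop is odoLoop with fuel t ^ n.toNat, the exact number of
-- rows it emits — a totality guard only, no algorithm switch.
def odoInc (t : Nat) (acc : List Nat) : List Nat → Option (List Nat)
  | [] => none
  | i :: rest =>
      if i = t - 1 then odoInc t (0 :: acc) rest
      else some (List.reverseAux acc ((i + 1) :: rest))

def odoLoop (mv : Int) (t : Nat) : Nat → List Nat → List (List Int)
  | 0, _ => []
  | fuel + 1, idx =>
      let row := idx.map (fun i => -mv + (i : Int))
      match odoInc t [] idx with
      | none => [row]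
      | some idx' => row :: odoLoop mv t fuel idx'

def generate_weight_combinations_alt (n : Int) (max_val : Int) : List (List Int) :=
  let t := ((max_val + 1) - -max_val).toNat
  if t = 0 then (if n = 0 then [[]] else [])
  else odoLoop max_val t (t ^ n.toNat) (List.replicate n.toNat 0)

-- ===== PRECONDITION & SPEC =====
-- Pre_ excludes n < 0, where Python A raises TypeError (int ** negative is a float, range(float)).
def Pre_generate_weight_combinations (n : Int) (max_val : Int) : Prop := 0 ≤ n
instance (n : Int) (max_val : Int) : Decidable (Pre_generate_weight_combinations n max_val) := by
  unfold Pre_generate_weight_combinations; infer_instance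
def pvWitness_generate_weight_combinations : Int × Int := (2, 1)

-- On even n > 0 with max_val < 0 A's negative-divisor modulo arithmetic fabricates a non-empty
-- list of out-of-range combinations (A (2,-1) = [[1,1]]), while B returns [], the intended value
-- since the value range [-max_val, max_val] is empty.
def D_generate_weight_combinations (n : Int) (max_val : Int) : Prop :=
  0 < n ∧ n % 2 = 0 ∧ max_val < 0
instance (n : Int) (max_val : Int) : Decidable (D_generate_weight_combinations n max_val) := by
  unfold D_generate_weight_combinations; infer_instance

def Spec_generate_weight_combinations (n : Int) (max_val : Int) (out : List (List Int)) : Prop :=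
  ¬ D_generate_weight_combinations n max_val → out = generate_weight_combinations_alt n max_val
instance (n : Int) (max_val : Int) (out : List (List Int)) : Decidable (Spec_generate_weight_combinations n max_val out) := by
  unfold Spec_generate_weight_combinations; infer_instance

def pvDiffWitness_generate_weight_combinations : Int × Int := (2, -1)
def pvDiffWitnessOut_generate_weight_combinations : (List (List Int)) × (List (List Int)) :=
  ([[1, 1]], [])

-- ===== CLAIM (what is proved, stated in full; the proofs are below) =====
def Claim_unchanged_generate_weight_combinations : Prop := ∀ (n : Int) (max_val : Int), Dom_generate_weight_combinations n max_val → Pre_generate_weight_combinations n max_val → Spec_generate_weight_combinations n max_val (generate_weight_combinations n max_val)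
def Claim_changed_generate_weight_combinations : Prop := Dom_generate_weight_combinations (pvDiffWitness_generate_weight_combinations.1) (pvDiffWitness_generate_weight_combinations.2) ∧ Pre_generate_weight_combinations (pvDiffWitness_generate_weight_combinations.1) (pvDiffWitness_generate_weight_combinations.2) ∧ D_generate_weight_combinations (pvDiffWitness_generate_weight_combinations.1) (pvDiffWitness_generate_weight_combinations.2) ∧ generate_weight_combinations (pvDiffWitness_generate_weight_combinations.1) (pvDiffWitness_generate_weight_combinations.2) = pvDiffWitnessOut_generate_weight_combinations.1 ∧ generate_weight_combinations_alt (pvDiffWitness_generate_weight_combinations.1) (pvDiffWitness_generate_weight_combinations.2) = pvDiffWitnessOut_generate_weight_combinations.2 ∧ pvDiffWitnessOut_generate_weight_combinations.1 ≠ pvDiffWitnessOut_generate_weight_combinations.2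
def Claim_exact_generate_weight_combinations : Prop := ∀ (n : Int) (max_val : Int), Dom_generate_weight_combinations n max_val → Pre_generate_weight_combinations n max_val → D_generate_weight_combinations n max_val → generate_weight_combinations n max_val ≠ generate_weight_combinations_alt n max_val

-- ===== LEMMAS AND PROOFS =====

-- the digit list A's inner loop builds from counter num (base t, offset m), head = fastest digit
def gwcDigits (t m : Int) : Nat → Int → List Int
  | 0, _ => []
  | k + 1, num =>
      (PySem.Int.mod num t - m) :: gwcDigits t m k (PySem.Int.floordiv num t)

-- A's inner foldl computes gwcDigits reversed onto the accumulator
theorem gwc_inner (t m : Int) :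
    ∀ (k : Nat) (acc : List Int) (num : Int),
      ((List.range k).foldl
        (fun (p : List Int × Int) _ =>
          ((PySem.Int.mod p.2 t - m) :: p.1, PySem.Int.floordiv p.2 t))
        (acc, num)).1 = (gwcDigits t m k num).reverse ++ acc := by
  intro k
  induction k with
  | zero => intro acc num; simp [gwcDigits]
  | succ k ih =>
      intro acc num
      rw [List.range_succ_eq_map]
      simp only [List.foldl_cons, List.foldl_map]
      rw [ih]
      simp [gwcDigits]

-- A's outer append-loop, cons-accumulated
theorem gwc_foldl_cons (f : Int → List Int) :
    ∀ (l : List Int) (acc : List (List Int)),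
      l.foldl (fun res i => f i :: res) acc = (l.map f).reverse ++ acc := by
  intro l
  induction l with
  | nil => intro acc; simp
  | cons a l ih => intro acc; simp [ih]

-- A as a map of gwcDigits over the counter range
theorem gwc_A_eq_map (n max_val : Int) (hn : n ≠ 0) :
    generate_weight_combinations n max_val =
      (PySem.List.pyRange 0 ((2 * max_val + 1) ^ n.toNat) 1).map
        (fun i => gwcDigits (2 * max_val + 1) max_val n.toNat i) := by
  unfold generate_weight_combinations
  rw [if_neg hn]
  rw [gwc_foldl_cons]
  simp [gwc_inner]

-- closed form of A's digits at a Nat counter and Nat base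
theorem gwc_digits_closed (T : Nat) (m : Int) :
    ∀ (k N : Nat),
      gwcDigits (T : Int) m k (N : Int)
        = (List.range k).map (fun j => ((N / T ^ j % T : Nat) : Int) - m) := by
  intro k
  induction k with
  | zero => intro N; simp [gwcDigits]
  | succ k ih =>
      intro N
      simp only [gwcDigits, PySem.Int.mod_natCast, PySem.Int.floordiv_natCast, ih]
      rw [List.range_succ_eq_map]
      simp only [List.map_cons, List.map_map, pow_zero, Nat.div_one, Function.comp_def]
      refine List.cons_eq_cons.mpr ⟨rfl, ?_⟩
      apply List.map_congr_left
      intro j _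
      have hdd : N / T / T ^ j = N / T ^ (j + 1) := by
        rw [Nat.div_div_eq_div_mul, ← pow_succ']
      rw [hdd]

-- the index vector after N increments: the little-endian base-t digits of N
def odoIdx (t : Nat) (k : Nat) (N : Nat) : List Nat :=
  (List.range k).map (fun j => N / t ^ j % t)

-- peeling one digit off the index vector
theorem odoIdx_succ (t k N : Nat) :
    odoIdx t (k + 1) N = N % t :: odoIdx t k (N / t) := by
  unfold odoIdx
  rw [List.range_succ_eq_map]
  simp only [List.map_cons, List.map_map, pow_zero, Nat.div_one, Function.comp_def]
  refine List.cons_eq_cons.mpr ⟨rfl, ?_⟩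
  apply List.map_congr_left
  intro j _
  rw [Nat.div_div_eq_div_mul, ← pow_succ']

-- successor arithmetic for symbolic base t (omega cannot divide by a variable)
theorem odoSuccFacts (t N : Nat) (ht : 0 < t) :
    (N % t = t - 1 → (N + 1) % t = 0 ∧ (N + 1) / t = N / t + 1 ∧ N + 1 = t * (N / t + 1)) ∧
    (N % t ≠ t - 1 → (N + 1) % t = N % t + 1 ∧ (N + 1) / t = N / t) := by
  have hd := Nat.div_add_mod N t
  have hmlt := Nat.mod_lt N ht
  constructor
  · intro hmod
    have hstep : N + 1 = t * (N / t + 1) := by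
      have h1 : N + 1 = t * (N / t) + t := by omega
      rw [h1, Nat.mul_add, Nat.mul_one]
    refine ⟨?_, ?_, hstep⟩
    · rw [hstep]; exact Nat.mul_mod_right t _
    · rw [hstep, Nat.mul_div_cancel_left _ ht]
  · intro hmod
    have hlt : N % t + 1 < t := by omega
    have hstep : N + 1 = t * (N / t) + (N % t + 1) := by omega
    constructor
    · rw [hstep, Nat.mul_add_mod, Nat.mod_eq_of_lt hlt]
    · rw [hstep, Nat.mul_add_div ht, Nat.div_eq_of_lt hlt, Nat.add_zero]

-- the carry scan without the zeroed-prefix accumulator (proof-side characterisation)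
def odoIncSpec (t : Nat) : List Nat → Option (List Nat)
  | [] => none
  | i :: rest =>
      if i = t - 1 then (odoIncSpec t rest).map (fun r => 0 :: r)
      else some ((i + 1) :: rest)

-- the port's accumulator form computes odoIncSpec with the reversed prefix restored
theorem odoInc_eq_spec (t : Nat) :
    ∀ (l acc : List Nat),
      odoInc t acc l = (odoIncSpec t l).map (fun r => acc.reverse ++ r) := by
  intro l
  induction l with
  | nil => intro acc; simp [odoInc, odoIncSpec]
  | cons i rest ih =>
      intro acc
      rw [odoInc, odoIncSpec]
      by_cases hi : i = t - 1
      · rw [if_pos hi, if_pos hi, ih (0 :: acc), Option.map_map]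
        cases odoIncSpec t rest <;> simp
      · rw [if_neg hi, if_neg hi]
        simp [List.reverseAux_eq]

-- one carry-scan step: digits of N become digits of N+1, or overflow at N = t^k - 1
theorem odoInc_idx (t : Nat) (ht : 0 < t) :
    ∀ (k N : Nat), N < t ^ k →
      odoIncSpec t (odoIdx t k N)
        = if N + 1 = t ^ k then none else some (odoIdx t k (N + 1)) := by
  intro k
  induction k with
  | zero =>
      intro N hN
      rw [pow_zero] at hN ⊢
      have hN0 : N = 0 := by omega
      subst hN0
      simp [odoIdx, odoIncSpec]
  | succ k ih =>
      intro N hN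
      rw [odoIdx_succ, odoIncSpec]
      have hNd : N / t < t ^ k := Nat.div_lt_of_lt_mul (by rw [← pow_succ']; exact hN)
      have hfacts := odoSuccFacts t N ht
      by_cases hmod : N % t = t - 1
      · obtain ⟨hm0, hdiv1, hstep⟩ := hfacts.1 hmod
        rw [if_pos hmod, ih (N / t) hNd]
        by_cases hdiv : N / t + 1 = t ^ k
        · rw [if_pos hdiv]
          have heq : N + 1 = t ^ (k + 1) := by
            rw [hstep, hdiv, ← pow_succ']
          rw [if_pos heq]
          rfl
        · rw [if_neg hdiv]
          have hne : ¬ (N + 1 = t ^ (k + 1)) := by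
            intro h
            apply hdiv
            have : t * (N / t + 1) = t * t ^ k := by rw [← hstep, h, pow_succ']
            exact Nat.eq_of_mul_eq_mul_left ht this
          rw [if_neg hne, odoIdx_succ, hm0, hdiv1]
          rfl
      · obtain ⟨hm1, hdiv0⟩ := hfacts.2 hmod
        rw [if_neg hmod]
        have hne : ¬ (N + 1 = t ^ (k + 1)) := by
          intro h
          have h0 : (N + 1) % t = 0 := by
            rw [h, pow_succ]
            exact Nat.mul_mod_left _ _
          omega
        rw [if_neg hne, odoIdx_succ, hm1, hdiv0]

-- running the emitted loop for r rows starting at counter N lists rows N, N+1, …, N+r-1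
theorem odoLoop_run (mv : Int) (t k : Nat) (ht : 0 < t) :
    ∀ (r N : Nat), 0 < r → N + r = t ^ k →
      odoLoop mv t r (odoIdx t k N)
        = (List.range' N r).map
            (fun M => (odoIdx t k M).map (fun i => -mv + (i : Int))) := by
  intro r
  induction r with
  | zero => intro N h0 _; omega
  | succ r ih =>
      intro N _ hNr
      have hN : N < t ^ k := by omega
      rw [odoLoop, odoInc_eq_spec, odoInc_idx t ht k N hN]
      by_cases hlast : N + 1 = t ^ k
      · have hr : r = 0 := by omega
        subst hr
        rw [if_pos hlast]
        simp [List.range']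
      · rw [if_neg hlast]
        have hr : 0 < r := by omega
        rw [List.range'_succ, List.map_cons, ← ih (N + 1) hr (by omega)]
        simp

-- the starting all-zero vector is the digit vector of 0
theorem odoIdx_zero (t k : Nat) : List.replicate k 0 = odoIdx t k 0 := by
  symm
  unfold odoIdx
  rw [List.eq_replicate_iff]
  refine ⟨by simp, ?_⟩
  intro b hb
  rw [List.mem_map] at hb
  obtain ⟨j, _, hj⟩ := hb
  simp [Nat.zero_div, Nat.zero_mod] at hj
  omega

-- ===== VERDICT (by name: the statement is the Claim_ definition above) =====
theorem generate_weight_combinations_spec : Claim_unchanged_generate_weight_combinations := by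
  intro n m _ hpre hnd
  have hpre' : (0:Int) ≤ n := hpre
  by_cases hm : 0 ≤ m
  · have ht : (0:Int) < 2 * m + 1 := by omega
    have htn : (((2 * m + 1).toNat : Int)) = 2 * m + 1 := by omega
    have hteq : ((m + 1) - -m).toNat = (2 * m + 1).toNat := by omega
    have hTpos : 0 < (2 * m + 1).toNat := by omega
    unfold generate_weight_combinations_alt
    rw [hteq, if_neg (by omega), odoIdx_zero,
      odoLoop_run m (2 * m + 1).toNat n.toNat hTpos ((2 * m + 1).toNat ^ n.toNat) 0
        (pow_pos hTpos n.toNat) (Nat.zero_add _)]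
    by_cases hn : n = 0
    · subst hn
      simp [generate_weight_combinations, odoIdx]
    · rw [gwc_A_eq_map n m hn]
      have hpow : (0:Int) < (2 * m + 1) ^ n.toNat := pow_pos ht _
      have hcast : ((2 * m + 1) ^ n.toNat - 0).toNat = (2 * m + 1).toNat ^ n.toNat := by
        have h1 : (((2 * m + 1).toNat ^ n.toNat : Nat) : Int) = (2 * m + 1) ^ n.toNat := by
          push_cast [htn]; ring
        omega
      rw [PySem.List.pyRange_one, hcast, ← List.range_eq_range']
      rw [List.map_map]
      apply List.map_congr_left
      intro i _
      simp only [Function.comp_def, zero_add]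
      rw [← htn, gwc_digits_closed]
      unfold odoIdx
      simp only [Int.toNat_natCast, bind_pure_comp, List.map_eq_map, List.map_map]
      apply List.map_congr_left
      intro j _
      simp only [Function.comp_def]
      omega
  · -- max_val < 0: the value range is empty; with n % 2 = 1 (even n is D_) A is [] too
    have hmneg : m < 0 := by omega
    unfold generate_weight_combinations_alt
    rw [show ((m + 1) - -m).toNat = 0 from by omega, if_pos rfl]
    by_cases hn : n = 0
    · subst hn; simp [generate_weight_combinations]
    · have hnpos : (0:Int) < n := lt_of_le_of_ne hpre' (Ne.symm hn)
      have hodd : n % 2 = 1 := by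
        have h2 : ¬ (n % 2 = 0) := fun h => hnd ⟨hnpos, h, by omega⟩
        omega
      have hoddNat : Odd n.toNat := by rw [Nat.odd_iff]; omega
      have ht2 : (2 * m + 1 : Int) < 0 := by omega
      have hpowneg : (2 * m + 1 : Int) ^ n.toNat < 0 := Odd.pow_neg hoddNat ht2
      rw [gwc_A_eq_map n m hn, PySem.List.pyRange_one_eq_nil (le_of_lt hpowneg)]
      simp [hn]

theorem generate_weight_combinations_changed : Claim_changed_generate_weight_combinations := by
  unfold Claim_changed_generate_weight_combinations; decide

theorem generate_weight_combinations_tight : Claim_exact_generate_weight_combinations := by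
  intro n m _ hpre hd
  obtain ⟨hnpos, heven, hmneg⟩ := hd
  have hn : n ≠ 0 := by omega
  rw [gwc_A_eq_map n m hn]
  unfold generate_weight_combinations_alt
  rw [show ((m + 1) - -m).toNat = 0 from by omega, if_pos rfl, if_neg hn]
  have hevenNat : Even n.toNat := by rw [Nat.even_iff]; omega
  have hne : (2 * m + 1 : Int) ≠ 0 := by omega
  have hpow : (0:Int) < (2 * m + 1) ^ n.toNat := Even.pow_pos hevenNat hne
  rw [PySem.List.pyRange_one_cons hpow]
  simp
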